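-- pv_equiv track=rewrite | github.com/SamLopBru/FinalDegreeProject | Application/utilFuncs.py | samplingSlices
-- ===== SOURCE A (Python) =====
-- def samplingSlices(slices, num_slices=27):
--     total_slices = len(slices)
--
--     if total_slices >= 100 and total_slices < 110:
--         slices = slices[3:total_slices-3]
--     elif total_slices >=  110 and total_slices<120:
--         slices = slices[6:total_slices-6]
--
--     first_turn = [slice for i, slice in enumerate(slices) if i%3 ==0]
--     second_turn = [slice for i, slice in enumerate(slices) if (i+2)%3 ==0]
--     third_turn = [slice for i, slice in enumerate(slices) if (i+1)%3 ==0]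
--
--     selected_slices = first_turn + second_turn + third_turn
--     selected_slices = selected_slices[:num_slices]
--
--     return selected_slices
-- ===== SOURCE B (Python) =====
-- def samplingSlices(slices, num_slices=27):
--     n = len(slices)
--     if 100 <= n < 110:
--         slices = slices[3:n-3]
--     elif 110 <= n < 120:
--         slices = slices[6:n-6]
--     m = len(slices)
--     # bucket sizes: c0 indices = 0 (mod 3), c1 indices = 1 (mod 3)
--     c0 = (m + 2) // 3
--     c1 = (m + 1) // 3
--     # Python slice-length of selected[:num_slices] on a list of length m
--     k = num_slices if num_slices >= 0 else m + num_slices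
--     k = max(0, min(k, m))
--     # closed-form source index for output position j: no scan/filter of the list
--     def src(j):
--         if j < c0:
--             return 3 * j
--         elif j < c0 + c1:
--             return 3 * (j - c0) + 1
--         else:
--             return 3 * (j - c0 - c1) + 2
--     return [slices[src(j)] for j in range(k)]
-- ===== Notes on version B (the rewrite author's own statement) =====
-- stated objective: faster
-- what changed: Instead of A's three residue-filtering passes over the list plus concatenation and truncation, B computes a closed-form mapping from each output position to its source index (via the bucket sizes ceil(m/3) and ceil((m-1)/3)) and builds only the min(num_slices, n) returned elements by direct indexing, never scanning or copying the whole list.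
import Mathlib
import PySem

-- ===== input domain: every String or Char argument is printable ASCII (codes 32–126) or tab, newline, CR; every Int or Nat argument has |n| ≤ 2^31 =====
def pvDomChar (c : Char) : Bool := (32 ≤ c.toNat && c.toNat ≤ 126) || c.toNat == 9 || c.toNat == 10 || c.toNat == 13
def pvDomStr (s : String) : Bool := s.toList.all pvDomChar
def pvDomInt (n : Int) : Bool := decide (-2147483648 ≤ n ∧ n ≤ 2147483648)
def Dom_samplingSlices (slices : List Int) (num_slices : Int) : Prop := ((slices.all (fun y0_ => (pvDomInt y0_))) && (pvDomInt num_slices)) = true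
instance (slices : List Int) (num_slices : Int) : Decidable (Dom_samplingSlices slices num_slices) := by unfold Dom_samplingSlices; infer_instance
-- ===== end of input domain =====

-- B replaces A's three residue-filter passes by a closed-form output-position -> source-index
-- mapping, building only the returned elements (measured faster on large inputs).


-- ===== PORT A =====
-- transliteration of A: two length-band slice adjustments, then three
-- residue-filtering comprehensions, concatenation, truncation to num_slices
def samplingSlices (slices : List Int) (num_slices : Int) : List Int :=
  let total : Int := slices.length
  let slices :=
    if total ≥ 100 ∧ total < 110 then PySem.List.slice slices (some 3) (some (total - 3))
    else if total ≥ 110 ∧ total < 120 then PySem.List.slice slices (some 6) (some (total - 6))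
    else slices
  let first_turn := (PySem.List.enumerate slices 0).filterMap
    (fun p => if PySem.Int.mod p.1 3 == 0 then some p.2 else none)
  let second_turn := (PySem.List.enumerate slices 0).filterMap
    (fun p => if PySem.Int.mod (p.1 + 2) 3 == 0 then some p.2 else none)
  let third_turn := (PySem.List.enumerate slices 0).filterMap
    (fun p => if PySem.Int.mod (p.1 + 1) 3 == 0 then some p.2 else none)
  PySem.List.slice (first_turn ++ second_turn ++ third_turn) none (some num_slices)

-- ===== PORT B =====
-- closed-form source index for output position j (Source B's inner 'src')
def samplingSlices_altSrc (c0 c1 j : Int) : Int :=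
  if j < c0 then 3 * j
  else if j < c0 + c1 then 3 * (j - c0) + 1
  else 3 * (j - c0 - c1) + 2

def samplingSlices_alt (slices : List Int) (num_slices : Int) : List Int :=
  let n : Int := slices.length
  let slices :=
    if 100 ≤ n ∧ n < 110 then PySem.List.slice slices (some 3) (some (n - 3))
    else if 110 ≤ n ∧ n < 120 then PySem.List.slice slices (some 6) (some (n - 6))
    else slices
  let m : Int := slices.length
  let c0 := PySem.Int.floordiv (m + 2) 3
  let c1 := PySem.Int.floordiv (m + 1) 3
  let k0 := if num_slices ≥ 0 then num_slices else m + num_slices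
  let k := max 0 (min k0 m)
  -- [slices[src(j)] for j in range(k)]; src(j) is always a valid index
  (PySem.List.pyRange 0 k 1).map
    (fun j => PySem.List.pyGetD slices (samplingSlices_altSrc c0 c1 j) 0)

-- ===== PRECONDITION & SPEC =====
def Spec_samplingSlices (slices : List Int) (num_slices : Int) (out : List Int) : Prop := out = samplingSlices_alt slices num_slices
instance (slices : List Int) (num_slices : Int) (out : List Int) : Decidable (Spec_samplingSlices slices num_slices out) := by unfold Spec_samplingSlices; infer_instance

-- ===== CLAIM =====
def Claim_equal_samplingSlices : Prop := ∀ (slices : List Int) (num_slices : Int), Dom_samplingSlices slices num_slices → Spec_samplingSlices slices num_slices (samplingSlices slices num_slices)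

-- ===== LEMMAS AND PROOFS =====

-- A's residue filter over enumerate IS the arithmetic subsequence at indices ≡ r (mod 3)
theorem samplingSlices_filt (ys : List Int) (c : Int) :
    ∀ (r : Nat) (k : Int), r < 3 → (3:Int) ∣ (k + c + r) →
    (PySem.List.enumerate ys k).filterMap
      (fun p => if PySem.Int.mod (p.1 + c) 3 == 0 then some p.2 else none)
    = (List.range ((ys.length + 2 - r) / 3)).map (fun j => ys.getD (r + 3 * j) 0) := by
  induction ys with
  | nil =>
    intro r k hr _
    have h : (List.length ([] : List Int) + 2 - r) / 3 = 0 := by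
      simp only [List.length_nil]; omega
    rw [h]
    simp [PySem.List.enumerate_nil]
  | cons y ys ih =>
    intro r k hr hd
    rw [PySem.List.enumerate_cons, List.filterMap_cons]
    by_cases hr0 : r = 0
    · subst hr0
      have hsel : PySem.Int.mod (k + c) 3 = 0 := by
        rw [PySem.Int.mod_eq_zero_iff_dvd]; omega
      simp only [hsel, beq_self_eq_true, if_true]
      rw [ih 2 (k + 1) (by omega) (by omega)]
      have hcnt : ((y :: ys).length + 2 - 0) / 3 = (ys.length + 2 - 2) / 3 + 1 := by
        simp only [List.length_cons]; omega
      rw [hcnt, List.range_succ_eq_map, List.map_cons, List.map_map]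
      congr 1
      apply List.map_congr_left
      intro j _
      show ys.getD (2 + 3 * j) 0 = (y :: ys).getD (0 + 3 * Nat.succ j) 0
      rw [show 0 + 3 * Nat.succ j = (2 + 3 * j) + 1 by omega, List.getD_cons_succ]
    · have hns : PySem.Int.mod (k + c) 3 ≠ 0 := by
        rw [Ne, PySem.Int.mod_eq_zero_iff_dvd]; omega
      have hif : (PySem.Int.mod (k + c) 3 == 0) = false := by
        simpa using hns
      rw [hif]
      simp only [Bool.false_eq_true, if_false]
      rw [ih (r - 1) (k + 1) (by omega) (by omega)]
      have hcnt : (ys.length + 2 - (r - 1)) / 3 = ((y :: ys).length + 2 - r) / 3 := by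
        simp only [List.length_cons]; omega
      rw [hcnt]
      apply List.map_congr_left
      intro j _
      show ys.getD ((r - 1) + 3 * j) 0 = (y :: ys).getD (r + 3 * j) 0
      rw [show r + 3 * j = ((r - 1) + 3 * j) + 1 by omega, List.getD_cons_succ]

-- the truncated concatenation equals B's positionally-built list
theorem samplingSlices_core (ys : List Int) (num : Int) :
    PySem.List.slice
      ((List.range ((ys.length + 2 - 0) / 3)).map (fun j => ys.getD (0 + 3 * j) 0)
        ++ (List.range ((ys.length + 2 - 1) / 3)).map (fun j => ys.getD (1 + 3 * j) 0)
        ++ (List.range ((ys.length + 2 - 2) / 3)).map (fun j => ys.getD (2 + 3 * j) 0))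
      none (some num)
    = (PySem.List.pyRange 0
        (max 0 (min (if num ≥ 0 then num else (ys.length : Int) + num) (ys.length : Int))) 1).map
        (fun j => PySem.List.pyGetD ys
          (samplingSlices_altSrc (PySem.Int.floordiv ((ys.length : Int) + 2) 3)
            (PySem.Int.floordiv ((ys.length : Int) + 1) 3) j) 0) := by
  set m := ys.length with hm
  set c0 := (m + 2 - 0) / 3 with hc0
  set c1 := (m + 2 - 1) / 3 with hc1
  set c2 := (m + 2 - 2) / 3 with hc2
  have hc0I : PySem.Int.floordiv ((m : Int) + 2) 3 = (c0 : Int) := by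
    rw [show ((m : Int) + 2) = (((m + 2 : Nat)) : Int) by push_cast; ring,
        show (3 : Int) = ((3 : Nat) : Int) by norm_num, PySem.Int.floordiv_natCast]
    have : (m + 2) / 3 = c0 := by omega
    rw [this]
  have hc1I : PySem.Int.floordiv ((m : Int) + 1) 3 = (c1 : Int) := by
    rw [show ((m : Int) + 1) = (((m + 1 : Nat)) : Int) by push_cast; ring,
        show (3 : Int) = ((3 : Nat) : Int) by norm_num, PySem.Int.floordiv_natCast]
    have : (m + 1) / 3 = c1 := by omega
    rw [this]
  have hsum : c0 + c1 + c2 = m := by omega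
  set K : Int := max 0 (min (if num ≥ 0 then num else (m : Int) + num) (m : Int)) with hK
  have hKnn : 0 ≤ K := by rw [hK]; exact le_max_left _ _
  have hKm : K ≤ (m : Int) := by
    rw [hK]; exact max_le (Int.natCast_nonneg m) (min_le_right _ _)
  rw [PySem.List.pyRange_one, List.map_map]
  have hlen : ((List.range c0).map (fun j => ys.getD (0 + 3 * j) 0)
        ++ (List.range c1).map (fun j => ys.getD (1 + 3 * j) 0)
        ++ (List.range c2).map (fun j => ys.getD (2 + 3 * j) 0)).length = m := by
    simp only [List.length_append, List.length_map, List.length_range]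
    omega
  have htake : ∃ T : Nat, PySem.List.slice
      ((List.range c0).map (fun j => ys.getD (0 + 3 * j) 0)
        ++ (List.range c1).map (fun j => ys.getD (1 + 3 * j) 0)
        ++ (List.range c2).map (fun j => ys.getD (2 + 3 * j) 0)) none (some num)
      = ((List.range c0).map (fun j => ys.getD (0 + 3 * j) 0)
        ++ (List.range c1).map (fun j => ys.getD (1 + 3 * j) 0)
        ++ (List.range c2).map (fun j => ys.getD (2 + 3 * j) 0)).take T
      ∧ min T m = K.toNat := by
    by_cases hnum : 0 ≤ num
    · refine ⟨num.toNat, PySem.List.slice_to _ hnum, ?_⟩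
      rw [hK, if_pos (by omega : num ≥ 0)]
      omega
    · set t := (-num).toNat with ht
      have hk : 0 < t := by omega
      have hnum' : num = -((t : Nat) : Int) := by omega
      refine ⟨m - t, ?_, ?_⟩
      · rw [hnum', PySem.List.slice_to_neg_natCast _ _ hk, hlen]
      · rw [hK, if_neg (by omega : ¬ num ≥ 0)]
        omega
  obtain ⟨T, hT, hTK⟩ := htake
  rw [hT]
  apply List.ext_getElem
  · simp only [List.length_take, List.length_map, List.length_range, hlen]
    omega
  · intro i h1 h2
    simp only [List.length_take, hlen, List.length_map, List.length_range] at h1 h2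
    have him : i < m := by omega
    simp only [List.getElem_take, List.getElem_map, List.getElem_range, Function.comp_apply]
    rw [show (0 : Int) + (i : Int) = (i : Int) by ring]
    simp only [hc0I, hc1I]
    unfold samplingSlices_altSrc
    by_cases hb0 : i < c0
    · rw [List.getElem_append_left (by
        simpa only [List.length_append, List.length_map, List.length_range] using
          (by omega : i < c0 + c1))]
      rw [List.getElem_append_left (by
        simpa only [List.length_map, List.length_range] using hb0)]
      rw [List.getElem_map, List.getElem_range]
      rw [if_pos (by exact_mod_cast hb0)]
      rw [show (3 : Int) * (i : Int) = (((0 + 3 * i : Nat)) : Int) by push_cast; ring,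
          PySem.List.pyGetD_natCast]
    · by_cases hb1 : i < c0 + c1
      · rw [List.getElem_append_left (by
          simpa only [List.length_append, List.length_map, List.length_range] using hb1)]
        rw [List.getElem_append_right (by
          simpa only [List.length_map, List.length_range] using (by omega : c0 ≤ i))]
        rw [List.getElem_map, List.getElem_range]
        rw [if_neg (by exact_mod_cast hb0), if_pos (by omega)]
        simp only [List.length_map, List.length_range]
        rw [show (3 : Int) * ((i : Int) - (c0 : Int)) + 1 = (((1 + 3 * (i - c0) : Nat)) : Int) by
              push_cast; omega,
            PySem.List.pyGetD_natCast]
      · rw [List.getElem_append_right (by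
          simpa only [List.length_append, List.length_map, List.length_range] using
            (by omega : c0 + c1 ≤ i))]
        rw [List.getElem_map, List.getElem_range]
        rw [if_neg (by exact_mod_cast hb0), if_neg (by omega)]
        simp only [List.length_append, List.length_map, List.length_range]
        rw [show (3 : Int) * ((i : Int) - (c0 : Int) - (c1 : Int)) + 2
              = (((2 + 3 * (i - (c0 + c1)) : Nat)) : Int) by push_cast; omega,
            PySem.List.pyGetD_natCast]

-- ===== VERDICT =====
theorem samplingSlices_spec : Claim_equal_samplingSlices := by
  intro slices num_slices _
  unfold Spec_samplingSlices samplingSlices samplingSlices_alt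
  simp only []
  have h0 : (fun (p : Int × Int) => if PySem.Int.mod p.1 3 == 0 then some p.2 else none)
      = (fun (p : Int × Int) => if PySem.Int.mod (p.1 + 0) 3 == 0 then some p.2 else none) := by
    funext p; norm_num
  set ys := if (slices.length : Int) ≥ 100 ∧ (slices.length : Int) < 110
      then PySem.List.slice slices (some 3) (some ((slices.length : Int) - 3))
      else if (slices.length : Int) ≥ 110 ∧ (slices.length : Int) < 120
      then PySem.List.slice slices (some 6) (some ((slices.length : Int) - 6))
      else slices with hys
  rw [h0,
      samplingSlices_filt ys 0 0 0 (by omega) (by norm_num),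
      samplingSlices_filt ys 2 1 0 (by omega) (by norm_num),
      samplingSlices_filt ys 1 2 0 (by omega) (by norm_num)]
  exact samplingSlices_core ys num_slices
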